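-- pv_equiv track=rewrite | github.com/muyajil/ethz-msc-thesis | code/tf-models/download_artifacts.py | get_local_path
-- ===== SOURCE A (Python) =====
-- def get_local_path(remote_path):
--     parts = remote_path.split('/')
--     is_relevant = False
--     path = '/models/'
--     for part in parts:
--         if is_relevant:
--             path += (part + '/')
--         if part == '04_model_artifacts':
--             is_relevant = True
--     return path[:-1]
-- ===== SOURCE B (Python) =====
-- def get_local_path(remote_path):
--     parts = remote_path.split('/')
--     if '04_model_artifacts' in parts:
--         after = parts[parts.index('04_model_artifacts') + 1:]
--     else:
--         after = []
--     if after: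
--         return '/models/' + '/'.join(after)
--     return '/models'
-- ===== Notes on version B (the rewrite author's own statement) =====
-- stated objective: simpler
-- what changed: Replaces A's running boolean flag and per-segment conditional append (with a trailing-slash trim) by find-index, slice and join over the split segments.
import Mathlib
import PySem

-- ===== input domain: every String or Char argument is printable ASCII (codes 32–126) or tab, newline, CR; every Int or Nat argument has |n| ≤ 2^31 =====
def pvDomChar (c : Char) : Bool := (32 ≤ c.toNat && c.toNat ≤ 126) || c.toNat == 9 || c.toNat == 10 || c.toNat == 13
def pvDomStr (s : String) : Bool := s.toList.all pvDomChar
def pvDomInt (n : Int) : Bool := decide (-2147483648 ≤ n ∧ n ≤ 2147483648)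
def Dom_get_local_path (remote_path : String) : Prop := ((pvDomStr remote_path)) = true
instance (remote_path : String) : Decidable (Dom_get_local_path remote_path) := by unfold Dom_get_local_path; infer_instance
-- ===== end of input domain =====

-- B replaces A's running boolean flag + per-segment conditional append (and the final
-- trailing-slash trim) by find-index, slice and join over the split segments; objective: simpler.

-- ===== PORT A =====
-- the marker segment '04_model_artifacts', as code points
def pvMarker : List Char := "04_model_artifacts".toList

-- one iteration of A's for-loop over the state (is_relevant, path)
def pvStepA (st : Bool × List Char) (part : List Char) : Bool × List Char :=
  let path := if st.1 then st.2 ++ (part ++ ['/']) else st.2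
  let rel := if part == pvMarker then true else st.1
  (rel, path)

def get_local_path (remote_path : String) : String :=
  let parts := PySem.Chars.splitOn remote_path.toList ['/']
  let st := parts.foldl pvStepA (false, "/models/".toList)
  -- path[:-1]
  String.ofList (PySem.List.slice st.2 none (some (-1)))

-- ===== PORT B =====
def get_local_path_alt (remote_path : String) : String :=
  let parts := PySem.Chars.splitOn remote_path.toList ['/']
  let after : List (List Char) :=
    match PySem.List.index? parts pvMarker with
    | some i => parts.drop (i + 1)      -- parts[idx+1:]
    | none => []
  if after ≠ [] then String.ofList ("/models/".toList ++ PySem.Chars.join ['/'] after)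
  else "/models"

-- ===== PRECONDITION & SPEC =====
def Spec_get_local_path (remote_path : String) (out : String) : Prop := out = get_local_path_alt remote_path
instance (remote_path : String) (out : String) : Decidable (Spec_get_local_path remote_path out) := by unfold Spec_get_local_path; infer_instance

-- ===== CLAIM (what is proved, stated in full; the proofs are below) =====
def Claim_equal_get_local_path : Prop := ∀ (remote_path : String), Dom_get_local_path remote_path → Spec_get_local_path remote_path (get_local_path remote_path)

-- ===== LEMMAS AND PROOFS =====

-- the tail of the segment list after the first marker, as B computes it
def pvAfter (parts : List (List Char)) : List (List Char) :=
  match PySem.List.index? parts pvMarker with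
  | some i => parts.drop (i + 1)
  | none => []

-- with the flag already set, A appends every remaining segment followed by '/'
theorem pvFoldA_true (parts : List (List Char)) (p : List Char) :
    parts.foldl pvStepA (true, p) = (true, p ++ (parts.map (· ++ ['/'])).flatten) := by
  induction parts generalizing p with
  | nil => simp
  | cons x t ih =>
      have h1 : pvStepA (true, p) x = (true, p ++ (x ++ ['/'])) := by simp [pvStepA]
      rw [List.foldl_cons, h1, ih]
      simp [List.append_assoc]

-- with the flag still unset, A appends exactly the segments after the first marker
theorem pvFoldA_false (parts : List (List Char)) (p : List Char) :
    (parts.foldl pvStepA (false, p)).2 = p ++ ((pvAfter parts).map (· ++ ['/'])).flatten := by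
  induction parts generalizing p with
  | nil => simp [pvAfter, PySem.List.index?]
  | cons x t ih =>
      by_cases hx : x = pvMarker
      · subst hx
        have h1 : pvStepA (false, p) pvMarker = (true, p) := by simp [pvStepA]
        have h2 : pvAfter (pvMarker :: t) = t := by
          unfold pvAfter
          rw [PySem.List.index?_cons_self]
          simp
        rw [List.foldl_cons, h1, pvFoldA_true, h2]
      · have hne : (x == pvMarker) = false := by simp [hx]
        have h1 : pvStepA (false, p) x = (false, p) := by simp [pvStepA, hne]
        have h2 : pvAfter (x :: t) = pvAfter t := by
          unfold pvAfter
          rw [PySem.List.index?_cons_of_ne t hx]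
          cases PySem.List.index? t pvMarker <;> simp
        rw [List.foldl_cons, h1, ih, h2]

-- the per-segment trailing-slash concatenation is the join plus one final slash
theorem pvFlatten_eq_join (l : List (List Char)) (h : l ≠ []) :
    (l.map (· ++ ['/'])).flatten = PySem.Chars.join ['/'] l ++ ['/'] := by
  induction l with
  | nil => exact absurd rfl h
  | cons x t ih =>
      cases t with
      | nil => simp [PySem.Chars.join_singleton]
      | cons y u =>
          rw [List.map_cons, List.flatten_cons, ih (by simp), PySem.Chars.join_cons_cons]
          simp [List.append_assoc]

theorem get_local_path_eq (s : String) :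
    get_local_path s = get_local_path_alt s := by
  show String.ofList (PySem.List.slice
        ((PySem.Chars.splitOn s.toList ['/']).foldl pvStepA (false, "/models/".toList)).2
        none (some (-1)))
      = if pvAfter (PySem.Chars.splitOn s.toList ['/']) ≠ [] then
          String.ofList ("/models/".toList ++
            PySem.Chars.join ['/'] (pvAfter (PySem.Chars.splitOn s.toList ['/'])))
        else "/models"
  rw [pvFoldA_false, PySem.List.slice_to_neg_one]
  by_cases h : pvAfter (PySem.Chars.splitOn s.toList ['/']) = []
  · rw [h]
    simp only [List.map_nil, List.flatten_nil, List.append_nil, ne_eq, not_true_eq_false,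
      if_false]
    decide
  · rw [if_pos h, pvFlatten_eq_join _ h]
    rw [show "/models/".toList ++
          (PySem.Chars.join ['/'] (pvAfter (PySem.Chars.splitOn s.toList ['/'])) ++ ['/'])
        = ("/models/".toList ++
            PySem.Chars.join ['/'] (pvAfter (PySem.Chars.splitOn s.toList ['/']))) ++ ['/'] by
      simp]
    rw [List.dropLast_concat]

-- ===== VERDICT (by name: the statement is the Claim_ definition above) =====
theorem get_local_path_spec : Claim_equal_get_local_path := by
  intro s _
  unfold Spec_get_local_path
  exact get_local_path_eq s
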